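-- pv_equiv track=rewrite | github.com/sskhan67/GPGPU-Programming- | QODE/Applications/GPU-pilot/atomic_states/mol_fci.py | frozen_core_fci_states
-- ===== SOURCE A (Python) =====
-- import copy
--
-- def add_electron( configs, next_possible ):
-- 	# configs:       for one electron :   [[0],[1],[2],[3], ..., [n]]
-- 	#                for two electrons:   [[0,1],[0,2], ..., [n1_max, n2_max]]
-- 	#                for three electrons: [[0,1,2],[0,1,3], ..., [n1_max,n2_max,n3_max]]
-- 	#                ... ...
-- 	#                ... ...
-- 	#
-- 	# next_possible: ONLY HOLD ONE ELECTRON ORBITAL NUMBERS. e.g., [[3],[4], ... [n4_max]]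
-- 	#
-- 	new_configs = []
-- 	for config in configs:
-- 		for orb in next_possible:
-- 			if orb[0] > config[-1]:
-- 				new_configs += [ copy.deepcopy( config + orb ) ]
-- 	return new_configs
--
-- def frozen_core_fci_states(num_spin_orbs, num_elec, num_core_elec):
-- 	"""\
-- 	Builds a list of all possible configurations of num_elec in num_spin_orbs, assuming that num_core_elec (must be an even number)
-- 	are frozen in the lowest-index alpha and beta orbitals.  The orbital indexing is such that all alphas precede all betas.
-- 	"""
-- 	num_val_elec = num_elec      - num_core_elec
-- 	num_val_orbs = num_spin_orbs - num_core_elec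
-- 	#
-- 	alpha_core = [ i                  for i in range(num_core_elec//2) ]	# indices of the alpha core orbitals
-- 	beta_core  = [ i+num_spin_orbs//2 for i in range(num_core_elec//2) ]	# indices of the beta  core orbitals
-- 	core_orbs  = alpha_core + beta_core					# indices of all the core orbitals
-- 	val_orbs   = [ i for i in range(num_spin_orbs) if i not in core_orbs ]	# indices of all the valence orbitals
-- 	#
-- 	possible_orb_list = []		# [ [all the places e1 might end up], [all the places e2 might end up], [all the places e3 might end up], ... ]
-- 	for n in range(num_val_elec):
-- 		possible_orbs = val_orbs[n : n + num_val_orbs-num_val_elec+1]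
-- 		possible_orb_list += [[ [i] for i in possible_orbs ]]
-- 	#
-- 	valence_states = []		# A list of configs, where each config is a list of occupied orbitals (eg, [[0,1,2],[0,1,3], ..., [N-3,N-2,N-1]]
-- 	if num_val_elec < 1:
-- 		raise ValueError("num of electrons < 1")
-- 	else:
-- 		valence_states = possible_orb_list[0]
-- 		for i in range(num_val_elec-1):
-- 			valence_states = add_electron( valence_states, possible_orb_list[i+1] )
-- 	#
-- 	fci_states = [ sorted(core_orbs+state) for state in valence_states ]	# interweave constant core states into list of occupied orbitals
-- 	#
-- 	return fci_states, valence_states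
-- ===== SOURCE B (Python) =====
-- def frozen_core_fci_states(num_spin_orbs, num_elec, num_core_elec):
-- 	"""Recursive depth-first enumeration of the valence configurations (same prologue,
-- 	no intermediate layer lists); matches the original's values and output order."""
-- 	num_val_elec = num_elec      - num_core_elec
-- 	num_val_orbs = num_spin_orbs - num_core_elec
-- 	alpha_core = [ i                  for i in range(num_core_elec//2) ]
-- 	beta_core  = [ i+num_spin_orbs//2 for i in range(num_core_elec//2) ]
-- 	core_orbs  = alpha_core + beta_core
-- 	val_orbs   = [ i for i in range(num_spin_orbs) if i not in core_orbs ]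
-- 	if num_val_elec < 1:
-- 		raise ValueError("num of electrons < 1")
-- 	width = num_val_orbs - num_val_elec + 1
-- 	def pick(n, last):
-- 		# configurations for electrons n..num_val_elec-1, each strictly above `last`,
-- 		# electron n drawn (in order) from its window val_orbs[n : n+width]
-- 		if n == num_val_elec:
-- 			return [[]]
-- 		return [ [orb] + rest
-- 		         for orb in val_orbs[n : n+width] if last is None or orb > last
-- 		         for rest in pick(n+1, orb) ]
-- 	valence_states = pick(0, None)
-- 	fci_states = [ sorted(core_orbs + state) for state in valence_states ]
-- 	return fci_states, valence_states
-- ===== Notes on version B (the rewrite author's own statement) =====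
-- stated objective: simpler
-- what changed: Replaced the layer-by-layer add_electron product (precomputed possible_orb_list plus repeated full-list rebuilds with deepcopy) by a single recursive depth-first enumerator that picks each electron's orbital from its window in increasing order.
import Mathlib
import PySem

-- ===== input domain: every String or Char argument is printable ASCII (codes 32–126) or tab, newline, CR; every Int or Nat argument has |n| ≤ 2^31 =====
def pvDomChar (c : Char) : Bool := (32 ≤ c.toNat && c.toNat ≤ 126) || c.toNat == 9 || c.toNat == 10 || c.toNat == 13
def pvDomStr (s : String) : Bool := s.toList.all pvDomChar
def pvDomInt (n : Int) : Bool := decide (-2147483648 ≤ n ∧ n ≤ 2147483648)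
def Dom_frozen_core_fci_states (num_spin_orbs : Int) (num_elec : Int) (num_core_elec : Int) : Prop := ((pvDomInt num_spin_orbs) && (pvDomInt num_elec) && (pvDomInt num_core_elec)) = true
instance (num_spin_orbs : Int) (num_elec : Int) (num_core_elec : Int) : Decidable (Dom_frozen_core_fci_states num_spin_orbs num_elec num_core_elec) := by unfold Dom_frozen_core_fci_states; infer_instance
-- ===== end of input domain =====

-- B replaces A's layer-by-layer add_electron product build with a recursive depth-first
-- enumerator of the valence configurations (objective: simpler).


-- ===== PORT A =====
-- add_electron: nested loops appending config+orb when orb[0] > config[-1]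
-- (the pyGet? accesses are exact; the `none` branches are Python's IndexError, unreachable
-- on the nonempty lists this file feeds it)
def fcsAddElectron (configs : List (List Int)) (nextPossible : List (List Int)) : List (List Int) :=
  configs.foldl (fun acc config =>
    nextPossible.foldl (fun acc2 orb =>
      match PySem.List.pyGet? orb 0, PySem.List.pyGet? config (-1) with
      | some a, some b => if b < a then acc2 ++ [config ++ orb] else acc2
      | _, _ => acc2) acc) []

def frozen_core_fci_states (num_spin_orbs : Int) (num_elec : Int) (num_core_elec : Int) : List (List Int) × List (List Int) :=
  let num_val_elec := num_elec - num_core_elec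
  let num_val_orbs := num_spin_orbs - num_core_elec
  let alpha_core := PySem.List.pyRange 0 (PySem.Int.floordiv num_core_elec 2) 1
  let beta_core := (PySem.List.pyRange 0 (PySem.Int.floordiv num_core_elec 2) 1).map
      (fun i => i + PySem.Int.floordiv num_spin_orbs 2)
  let core_orbs := alpha_core ++ beta_core
  let val_orbs := (PySem.List.pyRange 0 num_spin_orbs 1).filter (fun i => !(core_orbs.contains i))
  let possible_orb_list := (PySem.List.pyRange 0 num_val_elec 1).foldl (fun acc n =>
      acc ++ [ (PySem.List.slice val_orbs (some n)
                 (some (n + num_val_orbs - num_val_elec + 1))).map (fun i => [i]) ]) []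
  if num_val_elec < 1 then ([], [])   -- Python raises ValueError here; excluded by Pre_
  else
    let valence_states0 := PySem.List.pyGetD possible_orb_list 0 []
    let valence_states := (PySem.List.pyRange 0 (num_val_elec - 1) 1).foldl
        (fun vs i => fcsAddElectron vs (PySem.List.pyGetD possible_orb_list (i + 1) [])) valence_states0
    let fci_states := valence_states.map (fun state =>
        PySem.List.sorted (core_orbs ++ state) (fun x => x) false)
    (fci_states, valence_states)

-- ===== PORT B =====
-- pick(n, last): DFS over electrons n..num_val_elec-1; the `n == num_val_elec` stop test
-- is realized by the fuel argument m = num_val_elec - n (structural recursion)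
def fcsPick (valOrbs : List Int) (width : Int) : Nat → Int → Option Int → List (List Int)
  | 0, _, _ => [[]]
  | m + 1, n, last =>
      (PySem.List.slice valOrbs (some n) (some (n + width))).flatMap (fun orb =>
        if (match last with | none => true | some l => decide (l < orb)) then
          (fcsPick valOrbs width m (n + 1) (some orb)).map (fun rest => orb :: rest)
        else [])

def frozen_core_fci_states_alt (num_spin_orbs : Int) (num_elec : Int) (num_core_elec : Int) : List (List Int) × List (List Int) :=
  let num_val_elec := num_elec - num_core_elec
  let num_val_orbs := num_spin_orbs - num_core_elec
  let alpha_core := PySem.List.pyRange 0 (PySem.Int.floordiv num_core_elec 2) 1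
  let beta_core := (PySem.List.pyRange 0 (PySem.Int.floordiv num_core_elec 2) 1).map
      (fun i => i + PySem.Int.floordiv num_spin_orbs 2)
  let core_orbs := alpha_core ++ beta_core
  let val_orbs := (PySem.List.pyRange 0 num_spin_orbs 1).filter (fun i => !(core_orbs.contains i))
  if num_val_elec < 1 then ([], [])   -- Python raises ValueError here; excluded by Pre_
  else
    let width := num_val_orbs - num_val_elec + 1
    let valence_states := fcsPick val_orbs width num_val_elec.toNat 0 none
    let fci_states := valence_states.map (fun state =>
        PySem.List.sorted (core_orbs ++ state) (fun x => x) false)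
    (fci_states, valence_states)

-- ===== PRECONDITION & SPEC =====
-- Pre_ excludes exactly the inputs where A raises ValueError ("num of electrons < 1"); B raises there too.
def Pre_frozen_core_fci_states (num_spin_orbs : Int) (num_elec : Int) (num_core_elec : Int) : Prop :=
  1 ≤ num_elec - num_core_elec
instance (num_spin_orbs : Int) (num_elec : Int) (num_core_elec : Int) : Decidable (Pre_frozen_core_fci_states num_spin_orbs num_elec num_core_elec) := by unfold Pre_frozen_core_fci_states; infer_instance
def pvWitness_frozen_core_fci_states : Int × Int × Int := (6, 4, 2)

def Spec_frozen_core_fci_states (num_spin_orbs : Int) (num_elec : Int) (num_core_elec : Int) (out : List (List Int) × List (List Int)) : Prop := out = frozen_core_fci_states_alt num_spin_orbs num_elec num_core_elec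
instance (num_spin_orbs : Int) (num_elec : Int) (num_core_elec : Int) (out : List (List Int) × List (List Int)) : Decidable (Spec_frozen_core_fci_states num_spin_orbs num_elec num_core_elec out) := by unfold Spec_frozen_core_fci_states; infer_instance

-- ===== CLAIM (what is proved, stated in full; the proofs are below) =====
def Claim_equal_frozen_core_fci_states : Prop := ∀ (num_spin_orbs : Int) (num_elec : Int) (num_core_elec : Int), Dom_frozen_core_fci_states num_spin_orbs num_elec num_core_elec → Pre_frozen_core_fci_states num_spin_orbs num_elec num_core_elec → Spec_frozen_core_fci_states num_spin_orbs num_elec num_core_elec (frozen_core_fci_states num_spin_orbs num_elec num_core_elec)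

-- ===== LEMMAS AND PROOFS =====

theorem fcs_flatMap_filter {α β : Type} (p : α → Bool) (g : α → List β) (xs : List α) :
    (xs.filter p).flatMap g = xs.flatMap (fun x => if p x then g x else []) := by
  induction xs with
  | nil => rfl
  | cons x xs ih => by_cases h : p x <;> simp [h, ih]

-- add_electron on a window of singletons is a flatMap of threshold-filtered extensions
theorem fcs_flatMap_flatMap {α β γ : Type} (f : α → List β) (g : β → List γ) (xs : List α) :
    (xs.flatMap f).flatMap g = xs.flatMap (fun x => (f x).flatMap g) := by
  induction xs with
  | nil => rfl
  | cons x xs ih => simp [ih]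

theorem fcsAddElectron_eq (configs : List (List Int)) (w : List Int)
    (h : ∀ c ∈ configs, c ≠ []) :
    fcsAddElectron configs (w.map (fun i => [i])) =
      configs.flatMap (fun c =>
        (w.filter (fun i => decide (c.getLast?.getD 0 < i))).map (fun i => c ++ [i])) := by
  unfold fcsAddElectron
  rw [PySem.List.foldl_congr_mem _ _
      (fun acc config =>
        acc ++ (w.filter (fun i => decide (config.getLast?.getD 0 < i))).map (fun i => config ++ [i])) _
      ?_]
  · rw [PySem.List.foldl_append_eq_flatMap, List.nil_append]
  · intro acc c hc
    have hcne : c ≠ [] := h c hc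
    obtain ⟨l, hl⟩ : ∃ l, c.getLast? = some l := by
      cases hg : c.getLast? with
      | none => exact absurd (List.getLast?_eq_none_iff.mp hg) hcne
      | some l => exact ⟨l, rfl⟩
    rw [List.foldl_map]
    simp only [PySem.List.pyGet?_zero_cons, PySem.List.pyGet?_neg_one, hl, Option.getD_some]
    exact PySem.List.foldl_append_ite (fun i => l < i) (fun i => c ++ [i]) w acc

-- A's fold of add_electron over the successive windows equals B's DFS pick
theorem fold_add_eq_pick (valOrbs : List Int) (width : Int) :
    ∀ (k : Nat) (s : Int) (configs : List (List Int)), (∀ c ∈ configs, c ≠ []) →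
    (PySem.List.pyRange s (s + (k : Int)) 1).foldl
        (fun vs i => fcsAddElectron vs
          ((PySem.List.slice valOrbs (some (i + 1)) (some (i + 1 + width))).map (fun j => [j]))) configs
      = configs.flatMap (fun c =>
          (fcsPick valOrbs width k (s + 1) (some (c.getLast?.getD 0))).map (fun r => c ++ r)) := by
  intro k
  induction k with
  | zero =>
    intro s configs h
    rw [show s + ((0 : Nat) : Int) = s by simp, PySem.List.pyRange_one_eq_nil le_rfl]
    simp [fcsPick]
  | succ k ih =>
    intro s configs h
    have hcons : PySem.List.pyRange s (s + ((k + 1 : Nat) : Int)) 1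
        = s :: PySem.List.pyRange (s + 1) ((s + 1) + (k : Int)) 1 := by
      rw [show s + ((k + 1 : Nat) : Int) = (s + 1) + (k : Int) by push_cast; omega]
      exact PySem.List.pyRange_one_cons (by omega)
    rw [hcons, List.foldl_cons, fcsAddElectron_eq configs _ h]
    rw [ih (s + 1) _ (by
      intro c hc
      simp only [List.mem_flatMap, List.mem_map] at hc
      obtain ⟨c0, _, i, _, rfl⟩ := hc
      simp)]
    rw [fcs_flatMap_flatMap]
    refine congrArg (fun g => List.flatMap g configs) (funext fun c => ?_)
    rw [List.flatMap_map, fcs_flatMap_filter, fcsPick, List.map_flatMap]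
    refine congrArg (fun g => List.flatMap g
      (PySem.List.slice valOrbs (some (s + 1)) (some (s + 1 + width)))) (funext fun orb => ?_)
    by_cases horb : c.getLast?.getD 0 < orb <;>
      simp [horb, List.map_map, Function.comp_def, List.append_assoc]

-- the whole valence-state build, both ways, over abstract val_orbs / electron counts
theorem fcs_valence_eq (val_orbs : List Int) (nve nvo : Int) (h : 1 ≤ nve) :
    (PySem.List.pyRange 0 (nve - 1) 1).foldl
      (fun vs i => fcsAddElectron vs (PySem.List.pyGetD
         ((PySem.List.pyRange 0 nve 1).foldl (fun acc n =>
            acc ++ [ (PySem.List.slice val_orbs (some n) (some (n + nvo - nve + 1))).map (fun i => [i]) ]) [])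
         (i + 1) []))
      (PySem.List.pyGetD
         ((PySem.List.pyRange 0 nve 1).foldl (fun acc n =>
            acc ++ [ (PySem.List.slice val_orbs (some n) (some (n + nvo - nve + 1))).map (fun i => [i]) ]) [])
         0 [])
    = fcsPick val_orbs (nvo - nve + 1) nve.toNat 0 none := by
  simp only [PySem.List.foldl_append_singleton_eq_map, List.nil_append]
  rw [PySem.List.pyGetD_map_pyRange_of_nonneg _ _ 0 _ le_rfl (by omega)]
  rw [PySem.List.foldl_congr_mem _ _
      (fun vs i => fcsAddElectron vs
        ((PySem.List.slice val_orbs (some (i + 1)) (some (i + 1 + (nvo - nve + 1)))).map (fun j => [j]))) _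
      ?_]
  · rw [show nve - 1 = 0 + (((nve - 1).toNat : Nat) : Int) by omega]
    rw [fold_add_eq_pick val_orbs (nvo - nve + 1) (nve - 1).toNat 0 _ (by
      intro c hc
      simp only [List.mem_map] at hc
      obtain ⟨i, _, rfl⟩ := hc
      simp)]
    rw [show nve.toNat = (nve - 1).toNat + 1 by omega, fcsPick]
    rw [List.flatMap_map]
    rw [show (0 : Int) + nvo - nve + 1 = 0 + (nvo - nve + 1) by omega]
    refine congrArg (fun g => List.flatMap g
      (PySem.List.slice val_orbs (some 0) (some (0 + (nvo - nve + 1))))) (funext fun i => ?_)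
    simp
  · intro acc i hi
    rw [PySem.List.mem_pyRange_one] at hi
    rw [PySem.List.pyGetD_map_pyRange_of_nonneg _ _ (i + 1) _ (by omega) (by omega)]
    rw [show i + 1 + nvo - nve + 1 = i + 1 + (nvo - nve + 1) by omega]

-- ===== VERDICT (by name: the statement is the Claim_ definition above) =====
theorem frozen_core_fci_states_spec : Claim_equal_frozen_core_fci_states := by
  intro ns ne nc _ hpre
  have hp : 1 ≤ ne - nc := hpre
  unfold Spec_frozen_core_fci_states frozen_core_fci_states frozen_core_fci_states_alt
  simp only [if_neg (show ¬ (ne - nc < 1) by omega)]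
  rw [fcs_valence_eq _ (ne - nc) (ns - nc) hp]
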